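-- pv_equiv track=rewrite | github.com/devinamartin/CheckReconPython | CheckRecon.py | removeMatches
-- ===== SOURCE A (Python) =====
-- def removeMatches(Manual, Imported):
--     ManualUnmatched = list(Manual)
--     ImportUnmatched = dict(Imported)
--
--     for entry in Manual:
--         for key in Imported:
--             if entry in ImportUnmatched[key]:
--                 #pop uses index, remove uses first matching value
--                 ImportUnmatched[key].remove(entry)
--                 ManualUnmatched.remove(entry)
--                 break
--             else:
--                 continue
--             break
--
--     return (ManualUnmatched, ImportUnmatched)
-- ===== SOURCE B (Python) =====
-- def removeMatches(Manual, Imported):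
--     # Count how many of each value the manual list still needs to match.
--     need = {}
--     for x in Manual:
--         need[x] = need.get(x, 0) + 1
--     # One pass over the imported lists: greedily consume needed values,
--     # keeping the unconsumed elements.
--     ImportUnmatched = {}
--     for key, lst in Imported.items():
--         kept = []
--         for x in lst:
--             c = need.get(x, 0)
--             if c > 0:
--                 need[x] = c - 1
--             else:
--                 kept.append(x)
--         ImportUnmatched[key] = kept
--     # Leftover need[v] = number of unmatched manual occurrences of v;
--     # the matched ones are the earliest, so keep the last need[v] of each value.
--     unmatched = []
--     for x in reversed(Manual):
--         c = need.get(x, 0)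
--         if c > 0:
--             need[x] = c - 1
--             unmatched.append(x)
--     unmatched.reverse()
--     return (unmatched, ImportUnmatched)
-- ===== Notes on version B (the rewrite author's own statement) =====
-- stated objective: faster
-- what changed: A rescans every key's residual list for every manual entry (per-entry first-match search with list.remove); B makes one counting pass over Manual, one greedy consuming pass over the imported lists sharing a need-counter dict, and one reverse pass over Manual to keep the unmatched tail occurrences, removing all inner scans.
import Mathlib
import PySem

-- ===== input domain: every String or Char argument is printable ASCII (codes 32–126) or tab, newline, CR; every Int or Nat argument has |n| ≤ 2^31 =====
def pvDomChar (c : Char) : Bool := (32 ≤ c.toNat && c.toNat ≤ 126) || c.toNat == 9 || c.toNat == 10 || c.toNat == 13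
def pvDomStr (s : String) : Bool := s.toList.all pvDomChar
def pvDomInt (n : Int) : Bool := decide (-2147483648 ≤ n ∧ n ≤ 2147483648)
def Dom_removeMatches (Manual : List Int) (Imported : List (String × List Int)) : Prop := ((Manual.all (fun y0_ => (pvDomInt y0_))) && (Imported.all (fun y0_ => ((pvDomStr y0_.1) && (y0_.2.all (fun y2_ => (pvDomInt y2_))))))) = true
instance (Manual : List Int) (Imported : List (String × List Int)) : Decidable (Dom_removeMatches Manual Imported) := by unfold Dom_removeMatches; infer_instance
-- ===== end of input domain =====

-- B replaces A's per-entry rescans of every list with one counting pass and one greedy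
-- consuming pass (need-counter dict), which a timing run measured as faster.
-- Note: Python A mutates the inner lists of Imported in place (they are shared by dict());
-- the equivalence proved here is about the RETURN value.

-- ===== PORT A =====
-- inner 'for key in Imported' scan: on the first key whose current list contains
-- entry, remove entry from that list and from ManualUnmatched, then break
def pvAScan (entry : Int) (keys : List String) (mU : List Int)
    (iU : PySem.Dict String (List Int)) : List Int × PySem.Dict String (List Int) :=
  match keys with
  | [] => (mU, iU)
  | k :: ks =>
    let l := iU.getD k []        -- ImportUnmatched[key]; key always present, so no KeyError
    if entry ∈ l then
      ((PySem.List.remove? mU entry).getD mU,      -- ManualUnmatched.remove(entry); never fails here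
       iU.insert k ((PySem.List.remove? l entry).getD l))  -- ImportUnmatched[key].remove(entry)
    else pvAScan entry ks mU iU

def removeMatches (Manual : List Int) (Imported : List (String × List Int)) :
    List Int × (List (String × List Int)) :=
  let d := PySem.Dict.ofList Imported          -- ImportUnmatched = dict(Imported)
  let st := Manual.foldl (fun st entry => pvAScan entry d.keys st.1 st.2) (Manual, d)
  (st.1, st.2.items)

-- ===== PORT B =====
-- inner consuming loop over one imported list, threading the need counter
def pvBConsume (need : PySem.Dict Int Int) (lst kept : List Int) :
    PySem.Dict Int Int × List Int :=
  match lst with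
  | [] => (need, kept)
  | x :: xs =>
    let c := need.getD x 0
    if c > 0 then pvBConsume (need.insert x (c - 1)) xs kept
    else pvBConsume need xs (kept ++ [x])

def removeMatches_alt (Manual : List Int) (Imported : List (String × List Int)) :
    List Int × (List (String × List Int)) :=
  let need0 := Manual.foldl (fun d x => d.insert x (d.getD x 0 + 1)) PySem.Dict.empty
  let st := (PySem.Dict.ofList Imported).items.foldl
    (fun (st : PySem.Dict Int Int × PySem.Dict String (List Int)) kv =>
      let r := pvBConsume st.1 kv.2 []
      (r.1, st.2.insert kv.1 r.2))
    (need0, PySem.Dict.empty)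
  let u := Manual.reverse.foldl
    (fun (st : PySem.Dict Int Int × List Int) x =>
      let c := st.1.getD x 0
      if c > 0 then (st.1.insert x (c - 1), st.2 ++ [x]) else st)
    (st.1, ([] : List Int))
  (u.2.reverse, st.2.items)

-- ===== PRECONDITION & SPEC =====
def Spec_removeMatches (Manual : List Int) (Imported : List (String × List Int)) (out : List Int × (List (String × List Int))) : Prop := out = removeMatches_alt Manual Imported
instance (Manual : List Int) (Imported : List (String × List Int)) (out : List Int × (List (String × List Int))) : Decidable (Spec_removeMatches Manual Imported out) := by unfold Spec_removeMatches; infer_instance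

-- ===== CLAIM (what is proved, stated in full; the proofs are below) =====
def Claim_equal_removeMatches : Prop := ∀ (Manual : List Int) (Imported : List (String × List Int)), Dom_removeMatches Manual Imported → Spec_removeMatches Manual Imported (removeMatches Manual Imported)

-- ===== LEMMAS AND PROOFS =====

-- reference (proof-only) functional model: need counters as functions Int → Int
def pvBump (f : Int → Int) (e : Int) : Int → Int := fun v => if v = e then f v + 1 else f v
def pvDec (f : Int → Int) (e : Int) : Int → Int := fun v => if v = e then f v - 1 else f v

def pvConsume (f : Int → Int) : List Int → (Int → Int) × List Int
  | [] => (f, [])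
  | x :: xs =>
    if f x > 0 then pvConsume (pvDec f x) xs
    else
      let r := pvConsume f xs
      (r.1, x :: r.2)

def pvRun (f : Int → Int) : List (String × List Int) → (Int → Int) × List (String × List Int)
  | [] => (f, [])
  | p :: rest =>
    let c := pvConsume f p.2
    let r := pvRun c.1 rest
    (r.1, (p.1, c.2) :: r.2)

def pvDrop (g : Int → Int) : List Int → List Int
  | [] => []
  | x :: xs => if g x > 0 then pvDrop (pvDec g x) xs else x :: pvDrop g xs

def pvKeep (f : Int → Int) : List Int → (Int → Int) × List Int
  | [] => (f, [])
  | x :: xs =>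
    if f x > 0 then
      let r := pvKeep (pvDec f x) xs
      (r.1, x :: r.2)
    else pvKeep f xs

def pvScan (e : Int) : List (String × List Int) → Option (List (String × List Int))
  | [] => none
  | p :: rest =>
    if e ∈ p.2 then some ((p.1, p.2.erase e) :: rest)
    else (pvScan e rest).map (p :: ·)

def pvCnt (M : List Int) : Int → Int := fun v => (M.count v : Int)

def pvNN (f : Int → Int) : Prop := ∀ v, 0 ≤ f v

-- bounds
lemma pvConsume_fst_bounds (l : List Int) : ∀ (f : Int → Int), pvNN f →
    ∀ v, 0 ≤ (pvConsume f l).1 v ∧ (pvConsume f l).1 v ≤ f v := by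
  induction l with
  | nil => intro f hf v; simpa [pvConsume] using hf v
  | cons x xs ih =>
    intro f hf v
    by_cases hx : f x > 0
    · have hf' : pvNN (pvDec f x) := by
        intro u; unfold pvDec; split_ifs with h
        · have := hf u; subst h; omega
        · exact hf u
      have h2 := ih (pvDec f x) hf' v
      have h3 : pvDec f x v ≤ f v := by unfold pvDec; split_ifs <;> omega
      simp only [pvConsume, if_pos hx]
      exact ⟨h2.1, le_trans h2.2 h3⟩
    · simp only [pvConsume, if_neg hx]
      exact ih f hf v

lemma pvRun_fst_bounds (items : List (String × List Int)) : ∀ (f : Int → Int), pvNN f →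
    ∀ v, 0 ≤ (pvRun f items).1 v ∧ (pvRun f items).1 v ≤ f v := by
  induction items with
  | nil => intro f hf v; simpa [pvRun] using hf v
  | cons p rest ih =>
    intro f hf v
    have hc := pvConsume_fst_bounds p.2 f hf
    have hf' : pvNN (pvConsume f p.2).1 := fun u => (hc u).1
    have h2 := ih (pvConsume f p.2).1 hf' v
    simp only [pvRun]
    exact ⟨h2.1, le_trans h2.2 (hc v).2⟩

lemma pvRun_keys (items : List (String × List Int)) : ∀ f,
    ((pvRun f items).2).map Prod.fst = items.map Prod.fst := by
  induction items with
  | nil => intro f; simp [pvRun]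
  | cons p rest ih => intro f; simp [pvRun, ih]

-- crux: bumping the need at e consumes the first still-kept occurrence of e
lemma pvConsume_bump (l : List Int) : ∀ (f : Int → Int) (e : Int), pvNN f →
    pvConsume (pvBump f e) l =
      if e ∈ (pvConsume f l).2 then ((pvConsume f l).1, (pvConsume f l).2.erase e)
      else (pvBump (pvConsume f l).1 e, (pvConsume f l).2) := by
  induction l with
  | nil =>
    intro f e hf
    simp [pvConsume]
  | cons x xs ih =>
    intro f e hf
    by_cases hxe : x = e
    · subst hxe
      by_cases hx : f x > 0
      · have hb : pvBump f x x > 0 := by unfold pvBump; simp; omega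
        have hdec : pvDec (pvBump f x) x = pvBump (pvDec f x) x := by
          funext v; unfold pvBump pvDec; by_cases hv : v = x <;> simp [hv]
        have hf' : pvNN (pvDec f x) := by
          intro u; unfold pvDec; split_ifs with h
          · have := hf u; subst h; omega
          · exact hf u
        simp only [pvConsume, if_pos hx, if_pos hb, hdec]
        exact ih (pvDec f x) x hf'
      · have hx0 : f x = 0 := by have := hf x; omega
        have hb : pvBump f x x > 0 := by unfold pvBump; simp; omega
        have hdec : pvDec (pvBump f x) x = f := by
          funext v; unfold pvBump pvDec; by_cases hv : v = x <;> simp [hv, hx0]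
        simp only [pvConsume, if_neg hx, if_pos hb, hdec]
        simp [List.erase_cons_head]
    · have hbx : pvBump f e x = f x := by unfold pvBump; simp [hxe]
      by_cases hx : f x > 0
      · have hdec : pvDec (pvBump f e) x = pvBump (pvDec f x) e := by
          funext v; unfold pvBump pvDec
          by_cases hv : v = x
          · subst hv; simp [hxe]
          · by_cases hve : v = e
            · subst hve; simp [hv]
            · simp [hv, hve]
        have hf' : pvNN (pvDec f x) := by
          intro u; unfold pvDec; split_ifs with h
          · have := hf u; subst h; omega
          · exact hf u
        simp only [pvConsume, hbx, if_pos hx, hdec]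
        exact ih (pvDec f x) e hf'
      · simp only [pvConsume, hbx, if_neg hx]
        rw [ih f e hf]
        by_cases hmem : e ∈ (pvConsume f xs).2
        · have hm2 : e ∈ x :: (pvConsume f xs).2 := List.mem_cons_of_mem _ hmem
          simp only [if_pos hmem, if_pos hm2]
          rw [List.erase_cons_tail (by simp [fun h : x = e => hxe h])]
        · have hne : ¬ e = x := fun h => hxe h.symm
          have hm2 : e ∉ x :: (pvConsume f xs).2 := by simp [hmem, hne]
          simp only [if_neg hmem, if_neg hm2]

lemma pvRun_bump (items : List (String × List Int)) : ∀ (f : Int → Int) (e : Int), pvNN f →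
    pvRun (pvBump f e) items =
      match pvScan e (pvRun f items).2 with
      | some R' => ((pvRun f items).1, R')
      | none => (pvBump (pvRun f items).1 e, (pvRun f items).2) := by
  induction items with
  | nil =>
    intro f e hf
    simp [pvRun, pvScan]
  | cons p rest ih =>
    intro f e hf
    have hc := pvConsume_bump p.2 f e hf
    have hf1 : pvNN (pvConsume f p.2).1 := fun u => (pvConsume_fst_bounds p.2 f hf u).1
    by_cases hmem : e ∈ (pvConsume f p.2).2
    · -- the extra need is consumed inside this key's list
      have hrm : PySem.List.remove? (pvConsume f p.2).2 e
          = some ((pvConsume f p.2).2.erase e) :=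
        PySem.List.remove?_eq_some_erase _ _ hmem
      simp only [pvRun, hc, if_pos hmem, pvScan]
    · simp only [pvRun, hc, if_neg hmem]
      rw [ih (pvConsume f p.2).1 e hf1]
      simp only [pvScan, if_neg hmem]
      cases hs : pvScan e (pvRun (pvConsume f p.2).1 rest).2 with
      | none => simp []
      | some R' => simp []

-- pvDrop facts
lemma pvDrop_congr (M : List Int) : ∀ (g g' : Int → Int),
    (∀ v, (0 < g v ∨ 0 < g' v) → g v = g' v) → pvDrop g M = pvDrop g' M := by
  induction M with
  | nil => intro g g' h; simp [pvDrop]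
  | cons x xs ih =>
    intro g g' h
    by_cases hx : 0 < g x
    · have hx' : 0 < g' x := by have := h x (Or.inl hx); omega
      have heq : g x = g' x := h x (Or.inl hx)
      simp only [pvDrop, if_pos hx, if_pos hx']
      apply ih
      intro v hv
      unfold pvDec at hv ⊢
      by_cases hvx : v = x
      · simp only [if_pos hvx] at hv ⊢; subst hvx; omega
      · simp only [if_neg hvx] at hv ⊢; exact h v hv
    · have hx' : ¬ 0 < g' x := by
        intro hc; have := h x (Or.inr hc); omega
      simp only [pvDrop, if_neg hx, if_neg hx']
      rw [ih g g' h]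

lemma pvDrop_nonpos (M : List Int) (g : Int → Int) (h : ∀ v, g v ≤ 0) : pvDrop g M = M := by
  induction M with
  | nil => simp [pvDrop]
  | cons x xs ih =>
    have hx : ¬ g x > 0 := by have := h x; omega
    simp only [pvDrop, if_neg hx]
    rw [ih]

lemma pvDrop_remove (M : List Int) : ∀ (g : Int → Int) (e : Int), pvNN g →
    g e < (M.count e : Int) →
    PySem.List.remove? (pvDrop g M) e = some (pvDrop (pvBump g e) M) := by
  induction M with
  | nil =>
    intro g e hg h
    have := hg e
    simp at h
    omega
  | cons x xs ih =>
    intro g e hg h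
    by_cases hx : g x > 0
    · have hg' : pvNN (pvDec g x) := by
        intro u; unfold pvDec; split_ifs with hu
        · have := hg u; subst hu; omega
        · exact hg u
      by_cases hxe : x = e
      · subst hxe
        have hb : pvBump g x x > 0 := by unfold pvBump; simp; omega
        have hdec : pvDec (pvBump g x) x = pvBump (pvDec g x) x := by
          funext v; unfold pvBump pvDec; by_cases hv : v = x <;> simp [hv]
        have hcnt : pvDec g x x < (xs.count x : Int) := by
          unfold pvDec; simp [List.count_cons_self] at h ⊢; omega
        simp only [pvDrop, if_pos hx, if_pos hb, hdec]
        exact ih (pvDec g x) x hg' hcnt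
      · have hbx : pvBump g e x = g x := by unfold pvBump; simp [hxe]
        have hdec : pvDec (pvBump g e) x = pvBump (pvDec g x) e := by
          funext v; unfold pvBump pvDec
          by_cases hv : v = x
          · subst hv; simp [hxe]
          · by_cases hve : v = e
            · subst hve; simp [hv]
            · simp [hv, hve]
        have hcnt : pvDec g x e < (xs.count e : Int) := by
          have hne : ¬ e = x := fun hh => hxe hh.symm
          unfold pvDec
          rw [List.count_cons] at h
          simp [hxe, hne] at h ⊢
          omega
        simp only [pvDrop, hbx, if_pos hx, hdec]
        exact ih (pvDec g x) e hg' hcnt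
    · by_cases hxe : x = e
      · subst hxe
        have hx0 : g x = 0 := by have := hg x; omega
        have hb : pvBump g x x > 0 := by unfold pvBump; simp; omega
        have hdec : pvDec (pvBump g x) x = g := by
          funext v; unfold pvBump pvDec; by_cases hv : v = x <;> simp [hv, hx0]
        simp only [pvDrop, if_neg hx, if_pos hb, hdec]
        exact PySem.List.remove?_cons_self _ _
      · have hbx : pvBump g e x = g x := by unfold pvBump; simp [hxe]
        have hcnt : g e < (xs.count e : Int) := by
          have hne : ¬ e = x := fun hh => hxe hh.symm
          rw [List.count_cons] at h
          simp [fun hh : x = e => hxe hh] at h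
          omega
        simp only [pvDrop, hbx, if_neg hx]
        rw [PySem.List.remove?_cons_of_ne (pvDrop g xs) hxe, ih g e hg hcnt]
        rfl

-- pvKeep facts
lemma pvKeep_append (l1 l2 : List Int) : ∀ f,
    pvKeep f (l1 ++ l2) =
      ((pvKeep (pvKeep f l1).1 l2).1, (pvKeep f l1).2 ++ (pvKeep (pvKeep f l1).1 l2).2) := by
  induction l1 with
  | nil => intro f; simp [pvKeep]
  | cons x xs ih =>
    intro f
    by_cases hx : f x > 0
    · simp only [List.cons_append, pvKeep, if_pos hx]
      rw [ih (pvDec f x)]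
    · simp only [List.cons_append, pvKeep, if_neg hx]
      exact ih f

lemma pvKeep_fst (l : List Int) : ∀ (f : Int → Int), pvNN f →
    ∀ v, (pvKeep f l).1 v = max (f v - (l.count v : Int)) 0 := by
  induction l with
  | nil => intro f hf v; have := hf v; simp [pvKeep]; omega
  | cons x xs ih =>
    intro f hf v
    by_cases hx : f x > 0
    · have hf' : pvNN (pvDec f x) := by
        intro u; unfold pvDec; split_ifs with h
        · have := hf u; subst h; omega
        · exact hf u
      simp only [pvKeep, if_pos hx]
      rw [ih (pvDec f x) hf' v]
      unfold pvDec
      by_cases hvx : v = x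
      · subst hvx; rw [List.count_cons_self]; simp; omega
      · have hxv : x ≠ v := fun h => hvx h.symm
        simp [hxv, hvx]
    · have hx0 : f x = 0 := by have := hf x; omega
      simp only [pvKeep, if_neg hx]
      rw [ih f hf v]
      by_cases hvx : v = x
      · subst hvx; rw [List.count_cons_self]; push_cast; omega
      · have hxv : x ≠ v := fun h => hvx h.symm
        simp [hxv]

lemma pvKeep_rev_drop (M : List Int) : ∀ (f : Int → Int), pvNN f →
    (pvKeep f M.reverse).2.reverse = pvDrop (fun v => (M.count v : Int) - f v) M := by
  induction M with
  | nil => intro f hf; simp [pvKeep, pvDrop]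
  | cons x xs ih =>
    intro f hf
    have hrev : (x :: xs).reverse = xs.reverse ++ [x] := by simp
    rw [hrev, pvKeep_append]
    have hfst : ∀ v, (pvKeep f xs.reverse).1 v = max (f v - (xs.count v : Int)) 0 := by
      intro v
      rw [pvKeep_fst xs.reverse f hf v, List.count_reverse]
    by_cases hx : f x > (xs.count x : Int)
    · -- x survives: the quota for x is not exhausted by the tail
      have hfx : (pvKeep f xs.reverse).1 x > 0 := by rw [hfst x]; omega
      have h2 : (pvKeep (pvKeep f xs.reverse).1 [x]).2 = [x] := by
        simp only [pvKeep, if_pos hfx]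
      rw [h2, List.reverse_append]
      simp only [List.reverse_cons, List.reverse_nil, List.nil_append, List.singleton_append]
      have hnot : ¬ ((fun v => (((x :: xs).count v : Int)) - f v) x > 0) := by
        simp only [List.count_cons_self]; push_cast; omega
      simp only [pvDrop]
      rw [if_neg hnot]
      congr 1
      rw [ih f hf]
      apply pvDrop_congr
      intro v hv
      by_cases hvx : v = x
      · subst hvx
        simp only [List.count_cons_self] at hv ⊢
        push_cast at hv ⊢
        omega
      · have hxv : x ≠ v := fun h => hvx h.symm
        simp [hxv]
    · -- x is dropped: the tail already used the whole quota for x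
      have hfx : ¬ ((pvKeep f xs.reverse).1 x > 0) := by rw [hfst x]; omega
      have h2 : (pvKeep (pvKeep f xs.reverse).1 [x]).2 = [] := by
        simp only [pvKeep, if_neg hfx]
      rw [h2, List.append_nil, ih f hf]
      have hpos : ((fun v => (((x :: xs).count v : Int)) - f v) x > 0) := by
        simp only [List.count_cons_self]; push_cast; omega
      simp only [pvDrop]
      rw [if_pos hpos]
      have hdec : pvDec (fun v => (((x :: xs).count v : Int)) - f v) x
          = fun v => ((xs.count v : Int)) - f v := by
        funext v; unfold pvDec
        by_cases hvx : v = x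
        · subst hvx; simp only [List.count_cons_self]; push_cast; ring
        · have hxv : x ≠ v := fun h => hvx h.symm
          simp [hxv, hvx]
      rw [hdec]

-- A's key scan, on the items list of the dict
lemma pvAScan_eq (e : Int) (mU : List Int) :
    ∀ (rest done : List (String × List Int)), ((done ++ rest).map Prod.fst).Nodup →
    pvAScan e (rest.map Prod.fst) mU (PySem.Dict.mk (done ++ rest)) =
      match pvScan e rest with
      | none => (mU, PySem.Dict.mk (done ++ rest))
      | some rest' => ((PySem.List.remove? mU e).getD mU, PySem.Dict.mk (done ++ rest')) := by
  intro rest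
  induction rest with
  | nil => intro done hnd; simp [pvAScan, pvScan]
  | cons p rest2 ih =>
    intro done hnd
    have hkeys : (PySem.Dict.mk (done ++ p :: rest2)).keys.Nodup := hnd
    have hpmem : p ∈ done ++ p :: rest2 :=
      List.mem_append_right _ (List.mem_cons_self ..)
    have hmem : (p.1, p.2) ∈ (PySem.Dict.mk (done ++ p :: rest2)).items := hpmem
    have hget : (PySem.Dict.mk (done ++ p :: rest2)).getD p.1 [] = p.2 :=
      PySem.Dict.getD_of_mem_items _ hmem hkeys []
    rw [List.map_append, List.map_cons, List.nodup_append] at hnd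
    obtain ⟨h1, h2, h3⟩ := hnd
    have hp_rest : p.1 ∉ rest2.map Prod.fst := (List.nodup_cons.mp h2).1
    have hp_done : p.1 ∉ done.map Prod.fst := fun hm => h3 p.1 hm p.1 (List.mem_cons_self ..) rfl
    simp only [List.map_cons, pvAScan, hget]
    by_cases he : e ∈ p.2
    · have hrm : (PySem.List.remove? p.2 e).getD p.2 = p.2.erase e := by
        rw [PySem.List.remove?_eq_some_erase _ _ he]
        rfl
      have hcont : (PySem.Dict.mk (done ++ p :: rest2)).contains p.1 = true := by
        rw [PySem.Dict.contains_iff_mem_keys]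
        exact List.mem_map_of_mem hpmem
      have hitems : ((PySem.Dict.mk (done ++ p :: rest2)).insert p.1
            ((PySem.List.remove? p.2 e).getD p.2)).items
          = done ++ (p.1, p.2.erase e) :: rest2 := by
        rw [PySem.Dict.items_insert_of_contains _ _ hcont, hrm]
        show List.map _ (done ++ p :: rest2) = _
        rw [List.map_append, List.map_cons]
        congr 1
        · refine (List.map_congr_left ?_).trans (List.map_id _)
          intro q hq
          have hne : q.1 ≠ p.1 := fun hh => hp_done (hh ▸ List.mem_map_of_mem hq)
          simp [hne]
        · congr 1
          · simp
          · refine (List.map_congr_left ?_).trans (List.map_id _)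
            intro q hq
            have hne : q.1 ≠ p.1 := fun hh => hp_rest (hh ▸ List.mem_map_of_mem hq)
            simp [hne]
      have hdict : ((PySem.Dict.mk (done ++ p :: rest2)).insert p.1
            ((PySem.List.remove? p.2 e).getD p.2))
          = PySem.Dict.mk (done ++ (p.1, p.2.erase e) :: rest2) :=
        PySem.Dict.ext hitems
      simp only [if_pos he, pvScan, hdict]
    · simp only [if_neg he]
      have hnd' : (((done ++ [p]) ++ rest2).map Prod.fst).Nodup := by
        rw [List.append_assoc, List.singleton_append, List.map_append, List.map_cons,
          List.nodup_append]
        exact ⟨h1, h2, h3⟩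
      have := ih (done ++ [p]) hnd'
      rw [List.append_assoc, List.singleton_append] at this
      rw [this]
      simp only [pvScan, if_neg he]
      cases hs : pvScan e rest2 with
      | none => simp
      | some r' =>
        simp only [Option.map_some]
        rw [List.append_assoc, List.singleton_append]

-- A's main fold invariant
lemma pvAFold (items0 : List (String × List Int)) (hnd : (items0.map Prod.fst).Nodup)
    (M : List Int) :
    ∀ (S P : List Int), M = P ++ S →
    S.foldl (fun st e => pvAScan e (items0.map Prod.fst) st.1 st.2)
        (pvDrop (fun v => pvCnt P v - (pvRun (pvCnt P) items0).1 v) M,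
         PySem.Dict.mk (pvRun (pvCnt P) items0).2)
    = (pvDrop (fun v => pvCnt M v - (pvRun (pvCnt M) items0).1 v) M,
       PySem.Dict.mk (pvRun (pvCnt M) items0).2) := by
  intro S
  induction S with
  | nil =>
    intro P h
    rw [List.append_nil] at h
    subst h
    rfl
  | cons e S' ih =>
    intro P h
    have hNN : pvNN (pvCnt P) := fun v => Int.natCast_nonneg _
    have hb := pvRun_fst_bounds items0 (pvCnt P) hNN
    have hkeysrest := pvRun_keys items0 (pvCnt P)
    have hnd2 : (((pvRun (pvCnt P) items0).2).map Prod.fst).Nodup := by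
      rw [hkeysrest]; exact hnd
    have hA := pvAScan_eq e
        (pvDrop (fun v => pvCnt P v - (pvRun (pvCnt P) items0).1 v) M)
        (pvRun (pvCnt P) items0).2 [] (by rw [List.nil_append]; exact hnd2)
    rw [List.nil_append] at hA
    have hbump : pvCnt (P ++ [e]) = pvBump (pvCnt P) e := by
      funext v; unfold pvCnt pvBump
      rw [List.count_append]
      by_cases hv : v = e
      · subst hv; simp []
      · have hev : e ≠ v := fun hh => hv hh.symm
        simp [hv, hev]
    have hcrux := pvRun_bump items0 (pvCnt P) e hNN
    rw [← hbump] at hcrux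
    rw [hkeysrest] at hA
    simp only [List.foldl_cons]
    rw [hA]
    cases hs : pvScan e (pvRun (pvCnt P) items0).2 with
    | some rest' =>
      simp only [hs] at hcrux
      simp only []
      have hgNN : pvNN (fun v => pvCnt P v - (pvRun (pvCnt P) items0).1 v) := by
        intro v
        have h2 := (hb v).2
        simp only []
        omega
      have hlt : (fun v => pvCnt P v - (pvRun (pvCnt P) items0).1 v) e < (M.count e : Int) := by
        have h1 : (P.count e : Int) + 1 ≤ (M.count e : Int) := by
          rw [h, List.count_append, List.count_cons_self]
          push_cast
          omega
        have h2 := (hb e).1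
        have hpc : pvCnt P e = (P.count e : Int) := rfl
        simp only []
        omega
      have hremove := pvDrop_remove M
          (fun v => pvCnt P v - (pvRun (pvCnt P) items0).1 v) e hgNN hlt
      have hg' : (fun v => pvCnt (P ++ [e]) v - (pvRun (pvCnt (P ++ [e])) items0).1 v)
          = pvBump (fun v => pvCnt P v - (pvRun (pvCnt P) items0).1 v) e := by
        funext v
        rw [hcrux, hbump]
        unfold pvBump
        by_cases hv : v = e
        · simp [hv]; ring
        · simp [hv]
      have hr2 : rest' = (pvRun (pvCnt (P ++ [e])) items0).2 := by rw [hcrux]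
      simp only [hremove, Option.getD_some, List.nil_append]
      rw [hr2, ← hg']
      exact ih (P ++ [e]) (by rw [h, List.append_assoc]; rfl)
    | none =>
      simp only [hs] at hcrux
      simp only []
      have hg' : (fun v => pvCnt (P ++ [e]) v - (pvRun (pvCnt (P ++ [e])) items0).1 v)
          = (fun v => pvCnt P v - (pvRun (pvCnt P) items0).1 v) := by
        funext v
        rw [hcrux, hbump]
        unfold pvBump
        by_cases hv : v = e
        · simp [hv]
        · simp [hv]
      have hr2 : (pvRun (pvCnt P) items0).2 = (pvRun (pvCnt (P ++ [e])) items0).2 := by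
        rw [hcrux]
      conv_lhs => rw [hr2, ← hg']
      exact ih (P ++ [e]) (by rw [h, List.append_assoc]; rfl)

-- B's loops against the reference
lemma pvBConsume_eq (l : List Int) :
    ∀ (d : PySem.Dict Int Int) (f : Int → Int) (kept : List Int),
    (∀ v, d.getD v 0 = f v) →
    (∀ v, (pvBConsume d l kept).1.getD v 0 = (pvConsume f l).1 v) ∧
    (pvBConsume d l kept).2 = kept ++ (pvConsume f l).2 := by
  induction l with
  | nil => intro d f kept hR; simp [pvBConsume, pvConsume, hR]
  | cons x xs ih =>
    intro d f kept hR
    have hx := hR x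
    by_cases hc : f x > 0
    · have hgt : d.getD x 0 > 0 := by rw [hx]; exact hc
      have hR' : ∀ v, (d.insert x (d.getD x 0 - 1)).getD v 0 = pvDec f x v := by
        intro v
        rw [PySem.Dict.getD_insert]
        unfold pvDec
        by_cases hv : v = x <;> simp [hv, hR v, hx]
      simp only [pvBConsume, pvConsume, if_pos hgt, if_pos hc]
      exact ih (d.insert x (d.getD x 0 - 1)) (pvDec f x) kept hR'
    · have hng : ¬ d.getD x 0 > 0 := by rw [hx]; exact hc
      simp only [pvBConsume, pvConsume, if_neg hng, if_neg hc]
      have h2 := ih d f (kept ++ [x]) hR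
      exact ⟨h2.1, by rw [h2.2, List.append_assoc]; rfl⟩

lemma pvBFold (items : List (String × List Int)) :
    ∀ (d : PySem.Dict Int Int) (f : Int → Int) (D : PySem.Dict String (List Int)),
    (∀ v, d.getD v 0 = f v) → (∀ p ∈ items, D.contains p.1 = false) →
    (items.map Prod.fst).Nodup →
    (∀ v, (items.foldl (fun (st : PySem.Dict Int Int × PySem.Dict String (List Int)) kv =>
        let r := pvBConsume st.1 kv.2 []
        (r.1, st.2.insert kv.1 r.2)) (d, D)).1.getD v 0 = (pvRun f items).1 v) ∧
    (items.foldl (fun (st : PySem.Dict Int Int × PySem.Dict String (List Int)) kv =>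
        let r := pvBConsume st.1 kv.2 []
        (r.1, st.2.insert kv.1 r.2)) (d, D)).2.items = D.items ++ (pvRun f items).2 := by
  induction items with
  | nil => intro d f D hR _ _; simp [pvRun, hR]
  | cons p rest ih =>
    intro d f D hR hfresh hnd
    have hb := pvBConsume_eq p.2 d f [] hR
    have hkept : (pvBConsume d p.2 []).2 = (pvConsume f p.2).2 := by
      rw [hb.2]; rfl
    have hDc : D.contains p.1 = false := hfresh p (List.mem_cons_self ..)
    have hfresh' : ∀ q ∈ rest, (D.insert p.1 (pvBConsume d p.2 []).2).contains q.1 = false := by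
      intro q hq
      rw [PySem.Dict.contains_insert]
      have hne : q.1 ≠ p.1 := by
        simp only [List.map_cons, List.nodup_cons] at hnd
        intro h
        exact hnd.1 (h ▸ List.mem_map_of_mem hq)
      simp [hne, hfresh q (List.mem_cons_of_mem _ hq)]
    have hnd' : (rest.map Prod.fst).Nodup := by
      simp only [List.map_cons, List.nodup_cons] at hnd
      exact hnd.2
    have hmain := ih (pvBConsume d p.2 []).1 (pvConsume f p.2).1
        (D.insert p.1 (pvBConsume d p.2 []).2) hb.1 hfresh' hnd'
    simp only [List.foldl_cons, pvRun]
    refine ⟨hmain.1, ?_⟩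
    rw [hmain.2, PySem.Dict.items_insert_of_not_contains _ _ hDc, hkept, List.append_assoc]
    rfl

lemma pvBRev (l : List Int) :
    ∀ (d : PySem.Dict Int Int) (f : Int → Int) (acc : List Int),
    (∀ v, d.getD v 0 = f v) →
    (l.foldl (fun (st : PySem.Dict Int Int × List Int) x =>
        let c := st.1.getD x 0
        if c > 0 then (st.1.insert x (c - 1), st.2 ++ [x]) else st) (d, acc)).2
      = acc ++ (pvKeep f l).2 := by
  induction l with
  | nil => intro d f acc hR; simp [pvKeep]
  | cons x xs ih =>
    intro d f acc hR
    have hx := hR x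
    by_cases hc : f x > 0
    · have hgt : d.getD x 0 > 0 := by rw [hx]; exact hc
      have hR' : ∀ v, (d.insert x (d.getD x 0 - 1)).getD v 0 = pvDec f x v := by
        intro v
        rw [PySem.Dict.getD_insert]
        unfold pvDec
        by_cases hv : v = x <;> simp [hv, hR v, hx]
      simp only [List.foldl_cons, pvKeep, if_pos hgt, if_pos hc]
      rw [ih (d.insert x (d.getD x 0 - 1)) (pvDec f x) (acc ++ [x]) hR']
      rw [List.append_assoc]
      rfl
    · have hng : ¬ d.getD x 0 > 0 := by rw [hx]; exact hc
      simp only [List.foldl_cons, pvKeep, if_neg hng, if_neg hc]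
      exact ih d f acc hR

lemma pvConsume_nonpos (l : List Int) (f : Int → Int) (h : ∀ v, f v ≤ 0) :
    pvConsume f l = (f, l) := by
  induction l with
  | nil => simp [pvConsume]
  | cons x xs ih =>
    have hx : ¬ f x > 0 := by have := h x; omega
    simp [pvConsume, if_neg hx, ih]

lemma pvRun_zero (items : List (String × List Int)) :
    pvRun (fun _ => 0) items = (fun _ => 0, items) := by
  induction items with
  | nil => simp [pvRun]
  | cons p rest ih =>
    simp [pvRun, pvConsume_nonpos p.2 (fun _ : Int => (0:Int)) (fun _ => le_refl 0), ih]

-- ===== VERDICT (by name: the statement is the Claim_ definition above) =====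
theorem removeMatches_spec : Claim_equal_removeMatches := by
  intro Manual Imported _
  unfold Spec_removeMatches removeMatches removeMatches_alt
  simp only []
  -- shared notation
  have hnd : ((PySem.Dict.ofList Imported).items.map Prod.fst).Nodup :=
    PySem.Dict.nodup_keys_ofList Imported
  have hNNM : pvNN (pvCnt Manual) := fun v => Int.natCast_nonneg _
  -- A-side: characterize the fold via the reference model
  have hzero : pvCnt ([] : List Int) = fun _ => (0 : Int) := by
    funext v; unfold pvCnt; simp
  have hA := pvAFold (PySem.Dict.ofList Imported).items hnd Manual Manual [] rfl
  rw [hzero, pvRun_zero] at hA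
  have hdropnil : pvDrop (fun v => (fun _ : Int => (0:Int)) v - (fun _ : Int => (0:Int), (PySem.Dict.ofList Imported).items).1 v) Manual = Manual :=
    pvDrop_nonpos Manual _ (fun v => by simp)
  rw [hdropnil] at hA
  have hmkd : (PySem.Dict.mk ((fun _ : Int => (0:Int), (PySem.Dict.ofList Imported).items).2))
      = PySem.Dict.ofList Imported := rfl
  rw [hmkd] at hA
  have hkeys : (PySem.Dict.ofList Imported).keys
      = (PySem.Dict.ofList Imported).items.map Prod.fst := rfl
  rw [hkeys, hA]
  -- B-side: the counter loop
  have hR0 : ∀ v, (Manual.foldl (fun d x => d.insert x (d.getD x 0 + 1))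
      PySem.Dict.empty).getD v 0 = pvCnt Manual v := by
    intro v
    rw [PySem.Dict.getD_foldl_insert_add_one, PySem.Dict.getD_empty]
    unfold pvCnt
    omega
  have hBF := pvBFold (PySem.Dict.ofList Imported).items
      (Manual.foldl (fun d x => d.insert x (d.getD x 0 + 1)) PySem.Dict.empty)
      (pvCnt Manual) PySem.Dict.empty hR0
      (fun p _ => PySem.Dict.contains_empty p.1) hnd
  have hf1NN : pvNN (pvRun (pvCnt Manual) (PySem.Dict.ofList Imported).items).1 :=
    fun v => (pvRun_fst_bounds (PySem.Dict.ofList Imported).items (pvCnt Manual) hNNM v).1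
  have hBR := pvBRev Manual.reverse _ _ ([] : List Int) hBF.1
  rw [hBR, List.nil_append]
  rw [hBF.2]
  have hempty : (PySem.Dict.empty : PySem.Dict String (List Int)).items = [] := rfl
  rw [hempty, List.nil_append]
  rw [pvKeep_rev_drop Manual _ hf1NN]
  rfl
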